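-- pv_equiv track=rewrite | github.com/smitelli/c8r | dictionary.py | term2pattern
-- ===== SOURCE A (Python) =====
-- def term2pattern(term):
--     pattern = ''
--     counter = 0
--
--     for char in term:
--         if char.isalpha():
--             if counter:
--                 pattern += '.' * counter
--                 counter = 0
--             pattern += char
--         elif char.isdigit():
--             counter *= 10
--             counter += int(char)
--
--     if counter:
--         pattern += '.' * counter
--
--     return pattern
-- ===== SOURCE B (Python) =====
-- def term2pattern(term):
--     # one filtering pass, then a run-based scan over maximal digit/letter runs
--     filtered = [c for c in term if c.isalpha() or c.isdigit()]
--     pieces = []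
--     i = 0
--     n = len(filtered)
--     while i < n:
--         j = i
--         if filtered[i].isdigit():
--             num = 0
--             while j < n and filtered[j].isdigit():
--                 num = num * 10 + int(filtered[j])
--                 j += 1
--             pieces.append('.' * num)
--         else:
--             while j < n and not filtered[j].isdigit():
--                 j += 1
--             pieces.append(''.join(filtered[i:j]))
--         i = j
--     return ''.join(pieces)
-- ===== Notes on version B (the rewrite author's own statement) =====
-- stated objective: alternative
-- what changed: A's single character loop with a carried digit counter and in-place string concatenation is replaced by a filter pass keeping only letters/digits followed by a run-based scan that consumes each maximal digit or letter run as a block, emitting one piece per run and joining at the end.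
import Mathlib
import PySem

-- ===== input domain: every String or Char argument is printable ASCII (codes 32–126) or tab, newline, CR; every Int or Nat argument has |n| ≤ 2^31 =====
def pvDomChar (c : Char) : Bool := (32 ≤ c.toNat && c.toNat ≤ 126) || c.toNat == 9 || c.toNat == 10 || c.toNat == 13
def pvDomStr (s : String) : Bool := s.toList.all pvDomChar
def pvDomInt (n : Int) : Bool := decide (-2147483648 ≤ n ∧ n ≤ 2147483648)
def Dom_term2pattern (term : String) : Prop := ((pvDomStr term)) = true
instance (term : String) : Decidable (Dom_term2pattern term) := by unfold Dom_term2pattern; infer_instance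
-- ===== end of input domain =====

-- B replaces A's single stateful character loop (carried counter) by a filter pass plus a
-- run-based scan over maximal digit/letter runs (objective: alternative decomposition, same cost).

-- int(char) for a char with isdigit = true (ASCII '0'..'9'): exact there
def pvDigit (c : Char) : Nat := c.toNat - 48
-- '.' * n (n is the nonnegative counter)
def pvDots (n : Nat) : String := String.ofList (List.replicate n '.')

-- ===== PORT A =====
def pvStepA (st : String × Nat) (char : Char) : String × Nat :=
  if PySem.Chars.isalpha char then
    let st := if st.2 ≠ 0 then (st.1 ++ pvDots st.2, 0) else st
    (st.1 ++ String.ofList [char], st.2)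
  else if PySem.Chars.isdigit char then
    (st.1, st.2 * 10 + pvDigit char)
  else st

-- trailing 'if counter: pattern += "." * counter'
def pvFinishA (st : String × Nat) : String :=
  if st.2 ≠ 0 then st.1 ++ pvDots st.2 else st.1

def term2pattern (term : String) : String :=
  pvFinishA (term.toList.foldl pvStepA ("", 0))

-- ===== PORT B =====
def pvAlnum (c : Char) : Bool := PySem.Chars.isalpha c || PySem.Chars.isdigit c

-- num = num * 10 + int(ch) folded over a digit run
def pvRunNum (run : List Char) : Nat := run.foldl (fun n ch => n * 10 + pvDigit ch) 0

-- the run-scanning while loop: each step consumes one maximal run and emits one piece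
def pvRuns : List Char → List String
  | [] => []
  | c :: t =>
    if h : PySem.Chars.isdigit c = true then
      -- h used by decreasing_by
      pvDots (pvRunNum ((c :: t).takeWhile (fun x => PySem.Chars.isdigit x)))
        :: pvRuns ((c :: t).dropWhile (fun x => PySem.Chars.isdigit x))
    else
      String.ofList ((c :: t).takeWhile (fun x => !PySem.Chars.isdigit x))
        :: pvRuns ((c :: t).dropWhile (fun x => !PySem.Chars.isdigit x))
termination_by l => l.length
decreasing_by
  · simp only [List.dropWhile_cons, h, if_pos]
    have := List.length_dropWhile_le (fun x => PySem.Chars.isdigit x) t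
    simp at this ⊢; omega
  · simp only [List.dropWhile_cons, Bool.not_eq_true', h]
    have := List.length_dropWhile_le (fun x => !PySem.Chars.isdigit x) t
    simp at this ⊢; omega

def term2pattern_alt (term : String) : String :=
  String.join (pvRuns (term.toList.filter pvAlnum))

-- ===== PRECONDITION & SPEC =====
def Spec_term2pattern (term : String) (out : String) : Prop := out = term2pattern_alt term
instance (term : String) (out : String) : Decidable (Spec_term2pattern term out) := by unfold Spec_term2pattern; infer_instance

-- ===== CLAIM (what is proved, stated in full; the proofs are below) =====
def Claim_equal_term2pattern : Prop := ∀ (term : String), Dom_term2pattern term → Spec_term2pattern term (term2pattern term)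

-- ===== LEMMAS AND PROOFS =====

theorem pv_not_alpha_of_digit (c : Char) (h : PySem.Chars.isdigit c = true) :
    PySem.Chars.isalpha c = false := by
  simp [PySem.Chars.isdigit, PySem.Chars.isalpha, PySem.Chars.isupper, PySem.Chars.islower,
    Char.le_def, UInt32.le_iff_toNat_le] at *
  omega

theorem pvDots_zero : pvDots 0 = "" := rfl

-- characterisation of A's loop: pvF c l is what A appends after state (·, c) on remaining input l
def pvF : Nat → List Char → String
  | c, [] => pvDots c
  | c, a :: t =>
    if PySem.Chars.isalpha a then pvDots c ++ String.ofList [a] ++ pvF 0 t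
    else if PySem.Chars.isdigit a then pvF (c * 10 + pvDigit a) t
    else pvF c t

theorem pvFinishA_foldl (l : List Char) (p : String) (c : Nat) :
    pvFinishA (l.foldl pvStepA (p, c)) = p ++ pvF c l := by
  induction l generalizing p c with
  | nil =>
    simp only [List.foldl_nil, pvFinishA, pvF]
    split_ifs with h
    · rfl
    · simp at h; simp [h, pvDots_zero]
  | cons a t ih =>
    simp only [List.foldl_cons, pvStepA]
    by_cases h1 : PySem.Chars.isalpha a
    · simp only [h1, if_true]
      split_ifs with hc
      · rw [ih]; simp [pvF, h1, String.append_assoc]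
      · simp only [ne_eq, Decidable.not_not] at hc
        rw [ih]; simp [pvF, h1, hc, pvDots_zero, String.append_assoc]
    · by_cases h2 : PySem.Chars.isdigit a
      · simp only [h1, h2]; rw [ih]; simp [pvF, h1, h2]
      · simp only [h1, h2]; rw [ih]; simp [pvF, h1, h2]

-- a digit run folds into the counter
theorem pvF_digit_run (g : List Char) (c : Nat) (rest : List Char)
    (hg : ∀ x ∈ g, PySem.Chars.isdigit x = true) :
    pvF c (g ++ rest) = pvF (g.foldl (fun n ch => n * 10 + pvDigit ch) c) rest := by
  induction g generalizing c with
  | nil => simp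
  | cons a t ih =>
    have ha : PySem.Chars.isdigit a = true := hg a (by simp)
    simp only [List.cons_append, pvF, pv_not_alpha_of_digit a ha, ha, if_true, if_false,
      Bool.false_eq_true, List.foldl_cons]
    exact ih _ (fun x hx => hg x (by simp [hx]))

-- when the remaining input does not start with a digit, the counter flushes as dots
theorem pvF_flush (c : Nat) (rest : List Char)
    (hrest : ∀ a t, rest = a :: t → PySem.Chars.isdigit a = false ∧ PySem.Chars.isalpha a = true) :
    pvF c rest = pvDots c ++ pvF 0 rest := by
  cases rest with
  | nil => simp [pvF, pvDots_zero]
  | cons a t =>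
    obtain ⟨hd, hal⟩ := hrest a t rfl
    simp [pvF, hal, pvDots_zero, String.append_assoc]

-- a letter run passes through unchanged
theorem pvF_alpha_run (g rest : List Char)
    (hg : ∀ x ∈ g, PySem.Chars.isalpha x = true) :
    pvF 0 (g ++ rest) = String.ofList g ++ pvF 0 rest := by
  induction g with
  | nil => simp
  | cons a t ih =>
    have ha := hg a (by simp)
    simp only [List.cons_append, pvF, ha, if_true, pvDots_zero]
    rw [ih (fun x hx => hg x (by simp [hx]))]
    have : String.ofList (a :: t) = String.ofList [a] ++ String.ofList t := by
      rw [← String.ofList_append]; rfl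
    simp [this, String.append_assoc]

theorem pv_mem_dropWhile {p : Char → Bool} {l : List Char} {x : Char}
    (hx : x ∈ l.dropWhile p) : x ∈ l :=
  List.Sublist.mem hx (List.dropWhile_sublist _)

theorem pv_mem_takeWhile {p : Char → Bool} {l : List Char} {x : Char}
    (hx : x ∈ l.takeWhile p) : x ∈ l :=
  List.Sublist.mem hx (List.takeWhile_sublist _)

theorem pv_foldl_append (rs : List String) (s : String) :
    List.foldl (fun r t => r ++ t) s rs = s ++ List.foldl (fun r t => r ++ t) "" rs := by
  induction rs generalizing s with
  | nil => simp
  | cons a t ih =>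
    simp only [List.foldl_cons]
    rw [ih (s ++ a), ih ("" ++ a)]
    simp [String.append_assoc]

theorem pv_alpha_of_alnum_not_digit (x : Char) (h1 : pvAlnum x = true)
    (h2 : PySem.Chars.isdigit x = false) : PySem.Chars.isalpha x = true := by
  simp [pvAlnum, h2] at h1; exact h1

theorem pvF_eq_join_runs (l : List Char) (hl : ∀ x ∈ l, pvAlnum x = true) :
    pvF 0 l = String.join (pvRuns l) := by
  induction hn : l.length using Nat.strong_induction_on generalizing l with
  | _ n ih =>
  cases l with
  | nil => simp [pvF, pvRuns, pvDots_zero, String.join]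
  | cons c t =>
    by_cases hd : PySem.Chars.isdigit c = true
    · -- digit run
      set p : Char → Bool := fun x => PySem.Chars.isdigit x with hp
      have hsplit : (c :: t).takeWhile p ++ (c :: t).dropWhile p = c :: t :=
        List.takeWhile_append_dropWhile
      have htw : ∀ x ∈ (c :: t).takeWhile p, PySem.Chars.isdigit x = true := by
        intro x hx; simpa using (List.mem_takeWhile_imp hx)
      have hdrop_head : ∀ a s, (c :: t).dropWhile p = a :: s →
          PySem.Chars.isdigit a = false ∧ PySem.Chars.isalpha a = true := by
        intro a s hs
        have hna : p a = false := by
          have := List.head?_dropWhile_not p (c :: t)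
          rw [hs] at this; simpa using this
        have hmem : a ∈ c :: t := by
          have : a ∈ (c :: t).dropWhile p := by simp [hs]
          exact pv_mem_dropWhile this
        refine ⟨by simpa [hp] using hna, pv_alpha_of_alnum_not_digit a (hl a hmem) (by simpa [hp] using hna)⟩
      have hlen : ((c :: t).dropWhile p).length < n := by
        have h1 : ((c :: t).dropWhile p) = t.dropWhile p := by simp [hp, hd]
        have h2 := List.length_dropWhile_le p t
        have hn' : t.length + 1 = n := by simpa using hn
        rw [h1]; omega
      have hrec := ih _ hlen ((c :: t).dropWhile p)
        (fun x hx => hl x (pv_mem_dropWhile hx)) rfl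
      calc pvF 0 (c :: t)
          = pvF 0 ((c :: t).takeWhile p ++ (c :: t).dropWhile p) := by rw [hsplit]
        _ = pvF (pvRunNum ((c :: t).takeWhile p)) ((c :: t).dropWhile p) :=
            pvF_digit_run _ 0 _ htw
        _ = pvDots (pvRunNum ((c :: t).takeWhile p)) ++ pvF 0 ((c :: t).dropWhile p) :=
            pvF_flush _ _ hdrop_head
        _ = String.join (pvRuns (c :: t)) := by
            rw [hrec]
            simp only [pvRuns, hd, hp, String.join]
            exact (pv_foldl_append _ _).symm
    · -- letter run
      have hda : PySem.Chars.isdigit c = false := by simpa using hd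
      set p : Char → Bool := fun x => !PySem.Chars.isdigit x with hp
      have hsplit : (c :: t).takeWhile p ++ (c :: t).dropWhile p = c :: t :=
        List.takeWhile_append_dropWhile
      have htw : ∀ x ∈ (c :: t).takeWhile p, PySem.Chars.isalpha x = true := by
        intro x hx
        have hnd : p x = true := List.mem_takeWhile_imp hx
        have hmem := pv_mem_takeWhile hx
        exact pv_alpha_of_alnum_not_digit x (hl x hmem) (by simpa [hp] using hnd)
      have hlen : ((c :: t).dropWhile p).length < n := by
        have h1 : ((c :: t).dropWhile p) = t.dropWhile p := by simp [hp, hda]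
        have h2 := List.length_dropWhile_le p t
        have hn' : t.length + 1 = n := by simpa using hn
        rw [h1]; omega
      have hrec := ih _ hlen ((c :: t).dropWhile p)
        (fun x hx => hl x (pv_mem_dropWhile hx)) rfl
      calc pvF 0 (c :: t)
          = pvF 0 ((c :: t).takeWhile p ++ (c :: t).dropWhile p) := by rw [hsplit]
        _ = String.ofList ((c :: t).takeWhile p) ++ pvF 0 ((c :: t).dropWhile p) :=
            pvF_alpha_run _ _ htw
        _ = String.join (pvRuns (c :: t)) := by
            rw [hrec]
            simp only [pvRuns, hda, hp, String.join]
            exact (pv_foldl_append _ _).symm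

-- A's loop ignores characters that are neither letters nor digits
theorem pv_foldl_filter (l : List Char) (st : String × Nat) :
    l.foldl pvStepA st = (l.filter pvAlnum).foldl pvStepA st := by
  induction l generalizing st with
  | nil => rfl
  | cons a t ih =>
    by_cases ha : pvAlnum a = true
    · simp [ha, ih]
    · have h1 : PySem.Chars.isalpha a = false := by
        simp [pvAlnum] at ha; exact ha.1
      have h2 : PySem.Chars.isdigit a = false := by
        simp [pvAlnum] at ha; exact ha.2
      simp [ha, pvStepA, h1, h2, ih]

-- ===== VERDICT (by name: the statement is the Claim_ definition above) =====
theorem term2pattern_spec : Claim_equal_term2pattern := by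
  intro term _
  unfold Spec_term2pattern term2pattern term2pattern_alt
  rw [pv_foldl_filter, pvFinishA_foldl]
  rw [pvF_eq_join_runs _ (fun x hx => List.of_mem_filter hx)]
  simp
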